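-- pv_equiv track=rewrite | github.com/guilhermegouw/Dojo | word_builder/challenge.py | word_builder_3_chars
-- ===== SOURCE A (Python) =====
-- def word_builder_3_chars(array):
--     words = []
--     for i in range(len(array)):
--         j = 0
--         for j in range(j, len(array)):
--             k = 0
--             for k in range(k, len(array)):
--                 if i != j and j != k and i != k:
--                     words.append(array[i] + array[j] + array[k])
--     return words
-- ===== SOURCE B (Python) =====
-- def word_builder_3_chars(array):
--     # Generate the ordered distinct-index triples directly by successive
--     # selection (remove the chosen element before the next pick), so no
--     # distinctness test is ever needed.
--     def selections(xs):
--         if not xs: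
--             return []
--         head, tail = xs[0], xs[1:]
--         return [(head, tail)] + [(y, [head] + rest) for y, rest in selections(tail)]
--
--     return [a + b + c
--             for a, rest1 in selections(array)
--             for b, rest2 in selections(rest1)
--             for c in rest2]
-- ===== Notes on version B (the rewrite author's own statement) =====
-- stated objective: alternative
-- what changed: A filters the full n^3 index cube with a distinctness branch; B generates permutations directly by successive selection (pick an element, recurse on the list with it removed), so only the n(n-1)(n-2) valid triples are ever produced and no branch is needed.
import Mathlib
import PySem

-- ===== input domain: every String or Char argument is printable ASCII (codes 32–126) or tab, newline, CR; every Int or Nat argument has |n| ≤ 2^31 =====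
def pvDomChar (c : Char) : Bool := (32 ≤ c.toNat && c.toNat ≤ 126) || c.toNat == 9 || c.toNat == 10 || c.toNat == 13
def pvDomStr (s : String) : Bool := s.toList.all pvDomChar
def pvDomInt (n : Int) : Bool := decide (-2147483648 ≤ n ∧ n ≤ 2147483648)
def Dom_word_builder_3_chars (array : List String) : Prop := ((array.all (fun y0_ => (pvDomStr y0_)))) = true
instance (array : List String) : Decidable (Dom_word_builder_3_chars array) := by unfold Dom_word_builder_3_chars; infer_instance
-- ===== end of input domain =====

-- B replaces A's filtered n^3 index cube by direct generation of the ordered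
-- distinct-index triples via successive selection (no distinctness branch).

-- ===== PORT A =====
def word_builder_3_chars (array : List String) : List String :=
  (PySem.List.pyRange 0 (array.length : Int) 1).foldl (fun words i =>
    (PySem.List.pyRange 0 (array.length : Int) 1).foldl (fun words j =>
      (PySem.List.pyRange 0 (array.length : Int) 1).foldl (fun words k =>
        if i ≠ j ∧ j ≠ k ∧ i ≠ k then
          words ++ [PySem.List.pyGetD array i "" ++ PySem.List.pyGetD array j "" ++ PySem.List.pyGetD array k ""]
        else words) words) words) []

-- ===== PORT B =====
-- Source B's selections(xs): each element paired with the list with it removed.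
def pvSelections : List String → List (String × List String)
  | [] => []
  | head :: tail => (head, tail) :: (pvSelections tail).map (fun p => (p.1, head :: p.2))

def word_builder_3_chars_alt (array : List String) : List String :=
  (pvSelections array).flatMap (fun p =>
    (pvSelections p.2).flatMap (fun q =>
      q.2.map (fun c => p.1 ++ q.1 ++ c)))

-- ===== PRECONDITION & SPEC =====
def Spec_word_builder_3_chars (array : List String) (out : List String) : Prop := out = word_builder_3_chars_alt array
instance (array : List String) (out : List String) : Decidable (Spec_word_builder_3_chars array out) := by unfold Spec_word_builder_3_chars; infer_instance

-- ===== CLAIM (what is proved, stated in full; the proofs are below) =====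
def Claim_equal_word_builder_3_chars : Prop := ∀ (array : List String), Dom_word_builder_3_chars array → Spec_word_builder_3_chars array (word_builder_3_chars array)

-- ===== LEMMAS AND PROOFS =====

-- index shift that skips position i
def pvShift (i t : Nat) : Nat := if t < i then t else t + 1

theorem pvShift_ne (i t : Nat) : pvShift i t ≠ i := by
  unfold pvShift; split <;> omega

theorem pvShift_inj (i a b : Nat) (h : pvShift i a = pvShift i b) : a = b := by
  unfold pvShift at h; split at h <;> split at h <;> omega

-- selections xs lists (xs[i], xs with index i erased) for i = 0..n-1
theorem pvSelections_eq (xs : List String) :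
    pvSelections xs = (List.range xs.length).map (fun i => (xs.getD i "", xs.eraseIdx i)) := by
  induction xs with
  | nil => simp [pvSelections]
  | cons h t ih =>
    simp [pvSelections, ih, List.range_succ_eq_map, List.map_map, Function.comp,
      Nat.succ_eq_add_one]

-- range n with i removed = shifted range (n-1)
theorem pvFilter_range_ne (n i : Nat) (h : i < n) :
    (List.range n).filter (fun t => !decide (t = i)) = (List.range (n - 1)).map (pvShift i) := by
  induction n with
  | zero => omega
  | succ n ih =>
    rw [List.range_succ, List.filter_append]
    by_cases hi : i < n
    · rw [ih hi]
      have hr : List.range (n + 1 - 1) = List.range (n - 1) ++ [n - 1] := by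
        rw [show n + 1 - 1 = n - 1 + 1 by omega, List.range_succ]
      rw [hr, List.map_append]
      have e1 : pvShift i (n - 1) = n := by unfold pvShift; split <;> omega
      have e2 : ¬ (n = i) := by omega
      simp [e1, e2]
    · have hi' : i = n := by omega
      subst hi'
      have h1 : (List.range i).filter (fun t => !decide (t = i)) = List.range i := by
        apply List.filter_eq_self.mpr
        intro a ha
        simp only [List.mem_range] at ha
        simp; omega
      have h2 : (List.range (i + 1 - 1)).map (pvShift i) = List.range i := by
        simp only [Nat.add_sub_cancel]
        rw [List.map_congr_left (g := id), List.map_id]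
        intro a ha
        simp only [List.mem_range] at ha
        simp [pvShift, ha]
      rw [h1, h2]
      simp

theorem pv_getD_map_range (f : Nat → String) (m t : Nat) :
    ((List.range m).map f).getD t "" = if t < m then f t else "" := by
  rw [List.getD_eq_getElem?_getD, List.getElem?_map]
  by_cases h : t < m
  · simp [h]
  · simp [h]

-- eraseIdx as a map over shifted indices
theorem pv_eraseIdx_eq (xs : List String) (i : Nat) (h : i < xs.length) :
    xs.eraseIdx i = (List.range (xs.length - 1)).map (fun t => xs.getD (pvShift i t) "") := by
  apply List.ext_getElem
  · simp [List.length_eraseIdx, h]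
  · intro j h1 h2
    have hj : j < xs.length - 1 := by simpa [List.length_eraseIdx, h] using h1
    rw [List.getElem_eraseIdx]
    simp only [List.getElem_map, List.getElem_range]
    have hs : pvShift i j < xs.length := by unfold pvShift; split <;> omega
    rw [List.getD_eq_getElem _ _ hs]
    unfold pvShift
    split <;> rfl

theorem pv_getD_eraseIdx (xs : List String) (i t : Nat) (h : i < xs.length) :
    (xs.eraseIdx i).getD t "" = xs.getD (pvShift i t) "" := by
  rw [pv_eraseIdx_eq xs i h, pv_getD_map_range]
  split
  · rfl
  · have : xs.length ≤ pvShift i t := by unfold pvShift; split <;> omega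
    rw [List.getD_eq_default _ _ this]

theorem pv_flatMap_congr {α β : Type} (l : List α) (g h : α → List β)
    (H : ∀ x ∈ l, g x = h x) : l.flatMap g = l.flatMap h := by
  induction l with
  | nil => rfl
  | cons x xs ih =>
    simp only [List.flatMap_cons]
    rw [H x (by simp), ih (fun y hy => H y (by simp [hy]))]

theorem pv_flatMap_drop {α β : Type} (l : List α) (p : α → Bool) (g : α → List β)
    (H : ∀ x ∈ l, p x = false → g x = []) : l.flatMap g = (l.filter p).flatMap g := by
  induction l with
  | nil => rfl
  | cons x xs ih =>
    simp only [List.flatMap_cons, List.filter_cons]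
    by_cases hp : p x = true
    · rw [if_pos hp, List.flatMap_cons, ih (fun y hy => H y (by simp [hy]))]
    · rw [if_neg hp, H x (by simp) (by simpa using hp),
        ih (fun y hy => H y (by simp [hy]))]
      simp

theorem pv_main (xs : List String) :
    word_builder_3_chars xs = word_builder_3_chars_alt xs := by
  unfold word_builder_3_chars word_builder_3_chars_alt
  simp only [PySem.List.pyRange_one, sub_zero, Int.toNat_natCast, zero_add,
    PySem.List.foldl_append_ite, PySem.List.foldl_append_eq_flatMap, List.nil_append,
    List.flatMap_map, List.filter_map, List.map_map, Function.comp_def,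
    PySem.List.pyGetD_natCast, Nat.cast_inj, pvSelections_eq, ne_eq]
  apply pv_flatMap_congr
  intro i hi
  rw [List.mem_range] at hi
  have hlen : (xs.eraseIdx i).length = xs.length - 1 := by
    simp [List.length_eraseIdx, hi]
  rw [hlen]
  rw [pv_flatMap_drop (List.range xs.length) (fun j => !decide (j = i)) _
      (by
        intro j hjm hj
        have hjei : j = i := by simpa using hj
        rw [hjei]
        simp)]
  rw [pvFilter_range_ne xs.length i hi, List.flatMap_map]
  apply pv_flatMap_congr
  intro j' hj'
  rw [List.mem_range] at hj'
  have hji := pvShift_ne i j'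
  have hcond : ∀ k ∈ List.range xs.length,
      (decide (¬ i = pvShift i j' ∧ ¬ pvShift i j' = k ∧ ¬ i = k))
        = (!decide (k = pvShift i j') && !decide (k = i)) := by
    intro k _
    rw [show (!decide (k = pvShift i j') && !decide (k = i))
        = decide (¬ k = pvShift i j' ∧ ¬ k = i) by simp, decide_eq_decide]
    omega
  rw [List.filter_congr hcond]
  rw [← List.filter_filter, pvFilter_range_ne xs.length i hi, List.filter_map]
  have hc2 : ∀ k' ∈ List.range (xs.length - 1),
      ((fun a => !decide (a = pvShift i j')) ∘ pvShift i) k' = !decide (k' = j') := by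
    intro k' _
    simp only [Function.comp_def]
    congr 1
    rw [decide_eq_decide]
    exact ⟨fun e => pvShift_inj i _ _ e, fun e => by rw [e]⟩
  rw [List.filter_congr hc2, pvFilter_range_ne (xs.length - 1) j' hj', List.map_map,
    List.map_map]
  have hj'e : j' < (xs.eraseIdx i).length := by omega
  rw [pv_eraseIdx_eq (xs.eraseIdx i) j' hj'e, hlen, List.map_map]
  apply List.map_congr_left
  intro t ht
  simp only [Function.comp_def]
  rw [pv_getD_eraseIdx xs i (pvShift j' t) hi, pv_getD_eraseIdx xs i j' hi]

-- ===== VERDICT (by name: the statement is the Claim_ definition above) =====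
theorem word_builder_3_chars_spec : Claim_equal_word_builder_3_chars := by
  intro array _
  unfold Spec_word_builder_3_chars
  exact pv_main array
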